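-- pv_equiv track=rewrite | github.com/juans9797/ADA_HomeWorks | Parcial 1/fill.py | solve
-- ===== SOURCE A (Python) =====
-- def solve(n,m,v):
-- 	low = v[0]
-- 	hi = 0
-- 	mid = 0
-- 	for i in v:
-- 		hi = hi + i
--
-- 	while low <= hi:
-- 		cont = 0
-- 		acc = 0
-- 		acc2 = 0
-- 		mid = low+((hi-low)//2)
-- 		while cont < n:
-- 			if (mid < max(v)):
-- 				acc2 = m + 1
-- 				cont = n
-- 			elif acc + v[cont] > mid:
-- 				acc2 = acc2 + 1
-- 				acc = v[cont]
-- 			else: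
-- 				acc = acc + v[cont]
-- 			cont = cont + 1
--
-- 		if acc2 < m:
-- 			hi = mid-1
-- 		else:
-- 			low = mid+1
--
-- 	return hi+1
-- ===== SOURCE B (Python) =====
-- def solve(n, m, v):
--     # Same bisection trajectory as A (the feasibility predicate is non-monotone
--     # when v has negative entries, so the probe order determines the answer),
--     # but restructured: max(v) is hoisted out of the loops, the greedy check
--     # reads a lazily built prefix-sum table and exits early once the segment
--     # budget is exceeded, and the search is a recursion carrying the best
--     # feasible probe instead of reconstructing the answer from the leftover
--     # upper bound.
--     total = sum(v)
--     mx = max(v)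
--     pre = []  # prefix-sum table, filled on the first probe that needs it
--
--     def ok(c):
--         if n > 0 and c < mx:
--             return False
--         if not pre:
--             pre.append(0)
--             for x in v[:n]:
--                 pre.append(pre[-1] + x)
--         cnt = 0
--         s = 0
--         for i in range(1, n + 1):
--             if pre[i] - pre[s] > c:
--                 cnt += 1
--                 s = i - 1
--                 if cnt >= m:
--                     return False
--         return cnt < m
--
--     def search(lo, hi, best):
--         if lo > hi:
--             return best
--         mid = (lo + hi) // 2
--         if ok(mid):
--             return search(lo, mid - 1, mid)
--         return search(mid + 1, hi, best)
--
--     return search(v[0], total, total + 1)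
-- ===== Notes on version B (the rewrite author's own statement) =====
-- stated objective: alternative
-- what changed: B keeps A's exact bisection trajectory (the greedy feasibility predicate is non-monotone when v has negative entries, so the probe order determines the returned value), but hoists the max(v) recomputation that A performs on every inner-loop step out of the loops, replaces the running-accumulator scan by a lazily built prefix-sum table read with an early exit once the segment budget is exceeded, and replaces the two imperative while-loops by a recursion that carries the best feasible probe instead of reconstructing the answer from the leftover upper bound.
import Mathlib
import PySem

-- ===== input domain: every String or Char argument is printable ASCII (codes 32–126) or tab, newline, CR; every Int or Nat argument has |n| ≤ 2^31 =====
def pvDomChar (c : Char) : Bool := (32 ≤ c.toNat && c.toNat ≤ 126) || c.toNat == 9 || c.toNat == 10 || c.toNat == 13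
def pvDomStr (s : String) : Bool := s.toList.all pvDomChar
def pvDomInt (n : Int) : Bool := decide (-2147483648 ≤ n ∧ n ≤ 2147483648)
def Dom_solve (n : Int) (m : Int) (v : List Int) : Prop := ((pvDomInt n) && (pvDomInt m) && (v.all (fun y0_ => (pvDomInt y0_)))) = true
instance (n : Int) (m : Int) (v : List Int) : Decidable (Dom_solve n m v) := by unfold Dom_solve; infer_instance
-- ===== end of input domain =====

-- B restructures A: max(v) hoisted out of the loops, the feasibility check reads a prefix-sum
-- table with an early exit, and the bisection is a recursion carrying the best feasible probe;
-- the bisection order itself is kept because the predicate is non-monotone on negative entries,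
-- so the probe sequence determines A's value (return-value equivalence; neither side mutates).


-- ===== PORT A =====
-- the inner 'while cont < n' loop, with fuel = the exact number of remaining iterations,
-- (n - cont).toNat (fuel 0 ↔ cont ≥ n, the loop's exit); the gate branch sets acc2 := m + 1 and
-- cont := n, after which 'cont = cont + 1' makes the guard false, so the loop returns m + 1.
def solveInner (v : List Int) (n m mid mx : Int) : Nat → Int → Int → Int → Int
  | 0, _, _, acc2 => acc2
  | fuel + 1, cont, acc, acc2 =>
    if cont < n then
      if mid < mx then m + 1
      else if acc + PySem.List.pyGetD v cont 0 > mid then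
        solveInner v n m mid mx fuel (cont + 1) (PySem.List.pyGetD v cont 0) (acc2 + 1)
      else
        solveInner v n m mid mx fuel (cont + 1) (acc + PySem.List.pyGetD v cont 0) acc2
    else acc2

-- the outer 'while low <= hi' loop, with fuel (hi + 1 - low).toNat (fuel 0 ↔ low > hi, the exit)
def solveLoop (v : List Int) (n m mx : Int) : Nat → Int → Int → Int
  | 0, _, hi => hi + 1
  | fuel + 1, low, hi =>
    if low ≤ hi then
      let mid := low + PySem.Int.floordiv (hi - low) 2
      if solveInner v n m mid mx n.toNat 0 0 0 < m then
        solveLoop v n m mx fuel low (mid - 1)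
      else
        solveLoop v n m mx fuel (mid + 1) hi
    else hi + 1

def solve (n : Int) (m : Int) (v : List Int) : Int :=
  let low := (PySem.List.pyGet? v 0).getD 0   -- v[0]; Pre_solve excludes v = []
  let hi := v.foldl (fun a b => a + b) 0
  solveLoop v n m ((PySem.List.max? v (fun y => y)).getD 0) (hi + 1 - low).toNat low hi

-- ===== PORT B =====
-- 'for x in v[:n]: pre.append(pre[-1] + x)' as a structural scan producing the appended tail
def altPre (xs : List Int) (last : Int) : List Int :=
  match xs with
  | [] => []
  | x :: rest => (last + x) :: altPre rest (last + x)

-- the 'for i in range(1, n+1)' body of ok(c) with the early 'return False'; fuel = remaining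
-- iterations (n + 1 - i).toNat (fuel 0 ↔ i > n, loop done)
def altOkLoop (pre : List Int) (m c : Int) : Nat → Int → Int → Int → Int → Bool
  | 0, _, _, _, cnt => decide (cnt < m)
  | fuel + 1, i, n, s, cnt =>
    if i ≤ n then
      if PySem.List.pyGetD pre i 0 - PySem.List.pyGetD pre s 0 > c then
        if cnt + 1 ≥ m then false
        else altOkLoop pre m c fuel (i + 1) n (i - 1) (cnt + 1)
      else altOkLoop pre m c fuel (i + 1) n s cnt
    else decide (cnt < m)

def altOk (pre : List Int) (n m mx c : Int) : Bool :=
  if 0 < n ∧ c < mx then false else altOkLoop pre m c n.toNat 1 n 0 0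

-- the bisection as a recursion carrying the best feasible probe; same fuel as A's loop
def altSearch (pre : List Int) (n m mx : Int) : Nat → Int → Int → Int → Int
  | 0, _, _, best => best
  | fuel + 1, lo, hi, best =>
    if lo > hi then best
    else
      let mid := PySem.Int.floordiv (lo + hi) 2
      if altOk pre n m mx mid then altSearch pre n m mx fuel lo (mid - 1) mid
      else altSearch pre n m mx fuel (mid + 1) hi best

def solve_alt (n : Int) (m : Int) (v : List Int) : Int :=
  let total := v.foldl (fun a b => a + b) 0
  let mx := (PySem.List.max? v (fun y => y)).getD 0
  let pre := 0 :: altPre (PySem.List.slice v none (some n)) 0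
  let low := (PySem.List.pyGet? v 0).getD 0
  altSearch pre n m mx (total + 1 - low).toNat low total (total + 1)

-- ===== PRECONDITION & SPEC =====
-- Pre_solve is exactly the set of inputs where the Python A returns: on empty v it raises
-- IndexError at v[0]; with n > len(v) the greedy scan indexes v[len(v)] (IndexError) as soon as a
-- probe reaches max(v), which happens unless sum(v) < max(v).
def Pre_solve (n : Int) (m : Int) (v : List Int) : Prop :=
  v ≠ [] ∧ (n ≤ (v.length : Int) ∨ v.sum < (PySem.List.max? v (fun y => y)).getD 0)
instance (n : Int) (m : Int) (v : List Int) : Decidable (Pre_solve n m v) := by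
  unfold Pre_solve; infer_instance

def pvWitness_solve : Int × Int × List Int := (3, 2, [4, 1, 2])

def Spec_solve (n : Int) (m : Int) (v : List Int) (out : Int) : Prop := out = solve_alt n m v
instance (n : Int) (m : Int) (v : List Int) (out : Int) : Decidable (Spec_solve n m v out) := by
  unfold Spec_solve; infer_instance

-- ===== CLAIM (what is proved, stated in full; the proofs are below) =====
def Claim_equal_solve : Prop := ∀ (n : Int) (m : Int) (v : List Int), Dom_solve n m v → Pre_solve n m v → Spec_solve n m v (solve n m v)

-- ===== LEMMAS AND PROOFS =====

theorem pv_mid_eq (lo hi : Int) :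
    lo + PySem.Int.floordiv (hi - lo) 2 = PySem.Int.floordiv (lo + hi) 2 := by
  rw [PySem.Int.floordiv_eq_ediv_of_pos (by omega), PySem.Int.floordiv_eq_ediv_of_pos (by omega)]
  omega

-- A's inner loop never decreases the running count
theorem solveInner_ge (v : List Int) (n m mid mx : Int) (hmx : ¬ mid < mx) :
    ∀ (fuel : Nat) (cont acc acc2 : Int), acc2 ≤ solveInner v n m mid mx fuel cont acc acc2 := by
  intro fuel
  induction fuel with
  | zero => intro cont acc acc2; exact le_refl acc2
  | succ fuel ih =>
    intro cont acc acc2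
    rw [solveInner]
    by_cases h1 : cont < n
    · rw [if_pos h1]
      rw [if_neg hmx]
      by_cases h2 : acc + PySem.List.pyGetD v cont 0 > mid
      · rw [if_pos h2]
        have := ih (cont + 1) (PySem.List.pyGetD v cont 0) (acc2 + 1)
        omega
      · rw [if_neg h2]
        exact ih (cont + 1) (acc + PySem.List.pyGetD v cont 0) acc2
    · simp [h1]

theorem altPre_length (xs : List Int) (a : Int) : (altPre xs a).length = xs.length := by
  induction xs generalizing a with
  | nil => simp [altPre]
  | cons x rest ih => simp [altPre, ih]

theorem altPre_getElem (xs : List Int) (a : Int) :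
    ∀ k (h : k < (altPre xs a).length), (altPre xs a)[k] = a + (xs.take (k + 1)).sum := by
  induction xs generalizing a with
  | nil => intro k h; simp [altPre] at h
  | cons x rest ih =>
    intro k h
    cases k with
    | zero => simp [altPre]
    | succ k =>
      have h' : k < (altPre rest (a + x)).length := by
        simpa [altPre] using h
      simp only [altPre, List.getElem_cons_succ]
      rw [ih (a + x) k h']
      simp [List.take_succ_cons]
      ring

-- value of the prefix table at an in-range index
theorem pre_get (v : List Int) (n : Int) (hn0 : 0 ≤ n) (hnl : n ≤ (v.length : Int)) :
    ∀ i : Int, 0 ≤ i → i ≤ n →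
      PySem.List.pyGetD (0 :: altPre (PySem.List.slice v none (some n)) 0) i 0
        = (v.take i.toNat).sum := by
  intro i h0 hin
  have hsl : PySem.List.slice v none (some n) = v.take n.toNat := by
    have h : ((n.toNat : Nat) : Int) = n := by omega
    rw [← h, PySem.List.slice_to_natCast]
    simp
    omega
  rw [hsl]
  have hlen : (0 :: altPre (v.take n.toNat) 0).length = n.toNat + 1 := by
    simp [altPre_length]
    omega
  have hilt : i < ((0 :: altPre (v.take n.toNat) 0).length : Int) := by
    rw [hlen]; omega
  rw [PySem.List.pyGetD_eq_getElem _ _ h0 hilt]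
  have key : ∀ (j : Nat) (hj : j < (0 :: altPre (v.take n.toNat) 0).length), j ≤ n.toNat →
      (0 :: altPre (v.take n.toNat) 0)[j] = (v.take j).sum := by
    intro j hj hjn
    cases j with
    | zero => simp
    | succ k =>
      have hklt : k < (altPre (v.take n.toNat) 0).length := by
        rw [altPre_length]
        rw [hlen] at hj
        rw [List.length_take]
        omega
      simp only [List.getElem_cons_succ]
      rw [altPre_getElem _ _ k hklt]
      rw [List.take_take]
      have hmin : min (k + 1) n.toNat = k + 1 := by omega
      rw [hmin]
      omega
  exact key i.toNat (by omega) (by omega)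

-- greedy scans agree step for step: A's accumulator is a difference of B's prefix-table entries
theorem greedy_eq (v : List Int) (n m mx c : Int) (hn0 : 0 < n)
    (hnl : n ≤ (v.length : Int)) (hmx : ¬ c < mx) :
    ∀ (fuel : Nat) (cont s cnt : Int), (n - cont).toNat ≤ fuel → 0 ≤ s → s ≤ cont → cont ≤ n →
      ((solveInner v n m c mx fuel cont
          (PySem.List.pyGetD (0 :: altPre (PySem.List.slice v none (some n)) 0) cont 0
            - PySem.List.pyGetD (0 :: altPre (PySem.List.slice v none (some n)) 0) s 0) cnt < m)
        ↔ altOkLoop (0 :: altPre (PySem.List.slice v none (some n)) 0) m c fuel (cont + 1) n s cnt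
            = true) := by
  set pre := 0 :: altPre (PySem.List.slice v none (some n)) 0 with hpre
  have hP := pre_get v n (by omega) hnl
  have hvc : ∀ i : Int, 0 ≤ i → i < n →
      PySem.List.pyGetD v i 0 = PySem.List.pyGetD pre (i + 1) 0 - PySem.List.pyGetD pre i 0 := by
    intro i h0 hiltn
    rw [hP (i + 1) (by omega) (by omega), hP i (by omega) (by omega)]
    have h1 : (i + 1).toNat = i.toNat + 1 := by omega
    have h2 : i.toNat < v.length := by omega
    rw [h1, List.sum_take_succ v i.toNat h2]
    rw [PySem.List.pyGetD_eq_getElem v 0 h0 (by exact_mod_cast (by omega : i < (v.length : Int)))]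
    ring
  intro fuel
  induction fuel with
  | zero =>
    intro cont s cnt hk hs hsc hcn
    rw [solveInner, altOkLoop]
    simp
  | succ fuel ih =>
    intro cont s cnt hk hs hsc hcn
    by_cases hlt : cont < n
    · have hcond : PySem.List.pyGetD pre cont 0 - PySem.List.pyGetD pre s 0
          + PySem.List.pyGetD v cont 0
          = PySem.List.pyGetD pre (cont + 1) 0 - PySem.List.pyGetD pre s 0 := by
        rw [hvc cont (by omega) hlt]; ring
      rw [solveInner, altOkLoop]
      rw [if_pos hlt, if_neg hmx, if_pos (show cont + 1 ≤ n by omega)]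
      rw [hcond]
      by_cases hbr : PySem.List.pyGetD pre (cont + 1) 0 - PySem.List.pyGetD pre s 0 > c
      · rw [if_pos hbr, if_pos hbr]
        by_cases hm : cnt + 1 ≥ m
        · rw [if_pos hm]
          have hge := solveInner_ge v n m c mx hmx fuel (cont + 1) (PySem.List.pyGetD v cont 0) (cnt + 1)
          simp only [Bool.false_eq_true, iff_false]
          omega
        · rw [if_neg hm]
          have hvc' : PySem.List.pyGetD v cont 0
              = PySem.List.pyGetD pre (cont + 1) 0 - PySem.List.pyGetD pre (cont + 1 - 1) 0 := by
            have h1 : cont + 1 - 1 = cont := by ring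
            rw [h1]
            exact hvc cont (by omega) hlt
          rw [hvc']
          exact ih (cont + 1) (cont + 1 - 1) (cnt + 1) (by omega) (by omega) (by omega) (by omega)
      · rw [if_neg hbr, if_neg hbr]
        exact ih (cont + 1) s cnt (by omega) (by omega) (by omega) (by omega)
    · rw [solveInner, altOkLoop]
      have h2 : ¬ cont + 1 ≤ n := by omega
      simp [hlt, h2]

-- the two feasibility checks agree (B's early exit included), given pre is the prefix table
theorem check_eq (v : List Int) (n m mx c : Int)
    (hn : n ≤ (v.length : Int)) :
    (solveInner v n m c mx n.toNat 0 0 0 < m) ↔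
      altOk (0 :: altPre (PySem.List.slice v none (some n)) 0) n m mx c = true := by
  by_cases hn0 : 0 < n
  · by_cases hcm : c < mx
    · have hf : n.toNat = (n.toNat - 1) + 1 := by omega
      rw [altOk, if_pos ⟨hn0, hcm⟩, hf, solveInner]
      rw [if_pos hn0, if_pos hcm]
      simp
    · rw [altOk, if_neg (by tauto)]
      have := greedy_eq v n m mx c hn0 hn hcm n.toNat 0 0 0 (by omega) le_rfl le_rfl (by omega)
      simpa using this
  · have hf : n.toNat = 0 := by omega
    rw [altOk, if_neg (by tauto), hf, solveInner, altOkLoop]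
    simp

-- bisection trajectories coincide: A's leftover-hi form equals B's best-carrying form
theorem loop_eq_search (v pre : List Int) (n m mx : Int) :
    ∀ (fuel : Nat) (lo hi : Int), (hi + 1 - lo).toNat ≤ fuel →
      (∀ c, lo ≤ c → c ≤ hi →
        ((solveInner v n m c mx n.toNat 0 0 0 < m) ↔ altOk pre n m mx c = true)) →
      solveLoop v n m mx fuel lo hi = altSearch pre n m mx fuel lo hi (hi + 1) := by
  intro fuel
  induction fuel with
  | zero => intro lo hi hk _; rfl
  | succ fuel ih =>
    intro lo hi hk hcheck
    by_cases hle : lo ≤ hi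
    · have hmid := PySem.Int.floordiv_two_mid_bounds (lo := lo) (hi := hi) hle
      rw [solveLoop, altSearch]
      simp only [hle, if_pos, not_lt.mpr hle, if_false]
      rw [pv_mid_eq lo hi]
      set mid := PySem.Int.floordiv (lo + hi) 2 with hmiddef
      have hc := hcheck mid hmid.1 hmid.2
      by_cases hfeas : solveInner v n m mid mx n.toNat 0 0 0 < m
      · have hb : altOk pre n m mx mid = true := hc.mp hfeas
        rw [if_pos hfeas, if_pos hb]
        rw [ih lo (mid - 1) (by omega) (fun c h1 h2 => hcheck c h1 (by omega))]
        congr 1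
        omega
      · have hb : ¬ altOk pre n m mx mid = true := fun h => hfeas (hc.mpr h)
        rw [if_neg hfeas, if_neg hb]
        exact ih (mid + 1) hi (by omega) (fun c h1 h2 => hcheck c (by omega) h2)
    · rw [solveLoop, altSearch]
      simp [hle, not_le.mp hle]

theorem pv_foldl_add (l : List Int) : ∀ a : Int, l.foldl (fun x y => x + y) a = a + l.sum := by
  induction l with
  | nil => intro a; simp
  | cons x rest ih => intro a; simp [List.foldl_cons, ih]; ring

-- ===== VERDICT (by name: the statement is the Claim_ definition above) =====
theorem solve_spec : Claim_equal_solve := by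
  intro n m v _ hpre
  obtain ⟨hne, hcase⟩ := hpre
  unfold Spec_solve
  simp only [solve, solve_alt]
  by_cases hnl : n ≤ (v.length : Int)
  · exact loop_eq_search v _ n m _ _ _ _ le_rfl (fun c _ _ => check_eq v n m _ c hnl)
  · have hsum : v.sum < (PySem.List.max? v (fun y => y)).getD 0 := by tauto
    have hn0 : 0 < n := by
      have : v.length ≠ 0 := fun h => hne (List.eq_nil_of_length_eq_zero h)
      omega
    apply loop_eq_search v _ n m _ _ _ _ le_rfl
    intro c _ hc2
    have hcmx : c < (PySem.List.max? v (fun y => y)).getD 0 := by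
      rw [pv_foldl_add] at hc2
      omega
    have hf : n.toNat = (n.toNat - 1) + 1 := by omega
    rw [altOk, if_pos ⟨hn0, hcmx⟩, hf, solveInner, if_pos hn0, if_pos hcmx]
    simp
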